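-- pv_equiv track=rewrite | github.com/romeorizzi/temi_prog_public | 2018.12.05.provetta/all-CMS-submissions-2018-12-05/2018-12-05.12:13:22.133343.VR437468.rank_unrank_ABstrings.py | ABstring2rank
-- ===== SOURCE A (Python) =====
-- def ABstring2rank(s):
--     pos=1
--     ran=0
--     for i in range(len(s)-1,-1,-1):
--         if (s[i]!='A'):
--             ran=ran+pos
--         pos=pos*2
--     return ran
-- ===== SOURCE B (Python) =====
-- def ABstring2rank(s):
--     ran = 0
--     for c in s:
--         ran = ran * 2 + (0 if c == 'A' else 1)
--     return ran
-- ===== Notes on version B (the rewrite author's own statement) =====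
-- stated objective: idiomatic
-- what changed: Replaces the backward index loop that maintains an explicit power-of-two weight with a forward Horner-style pass over the characters keeping only a single shifted accumulator.
import Mathlib
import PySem

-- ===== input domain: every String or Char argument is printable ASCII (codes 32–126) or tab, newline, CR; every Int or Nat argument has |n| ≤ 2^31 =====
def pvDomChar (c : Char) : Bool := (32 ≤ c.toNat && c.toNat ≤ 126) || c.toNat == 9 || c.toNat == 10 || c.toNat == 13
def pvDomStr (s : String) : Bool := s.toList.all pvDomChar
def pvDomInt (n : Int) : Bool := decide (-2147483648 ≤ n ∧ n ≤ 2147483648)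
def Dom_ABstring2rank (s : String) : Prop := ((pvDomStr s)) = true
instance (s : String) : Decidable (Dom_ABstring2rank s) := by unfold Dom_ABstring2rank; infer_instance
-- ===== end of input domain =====

-- B replaces A's backward index loop with an explicit doubling weight by a forward
-- Horner pass keeping a single shifted accumulator (idiomatic; same O(n) cost).

-- ===== PORT A =====
-- s[i] is exact via pyGetD: every index produced by the range lies in 0..len(s)-1,
-- so the default 'A' of pyGetD is never consulted.
def ABstring2rank (s : String) : Int :=
  let r := (PySem.List.pyRange (PySem.Str.len s - 1) (-1) (-1)).foldl
    (fun (pr : Int × Int) i =>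
      (pr.1 * 2, if PySem.List.pyGetD s.toList i 'A' ≠ 'A' then pr.2 + pr.1 else pr.2))
    (1, 0)
  r.2

-- ===== PORT B =====
def ABstring2rank_alt (s : String) : Int :=
  s.toList.foldl (fun ran c => ran * 2 + (if c = 'A' then 0 else 1)) 0

-- ===== PRECONDITION & SPEC =====
def Spec_ABstring2rank (s : String) (out : Int) : Prop := out = ABstring2rank_alt s
instance (s : String) (out : Int) : Decidable (Spec_ABstring2rank s out) := by unfold Spec_ABstring2rank; infer_instance

-- ===== CLAIM (what is proved, stated in full; the proofs are below) =====
def Claim_equal_ABstring2rank : Prop := ∀ (s : String), Dom_ABstring2rank s → Spec_ABstring2rank s (ABstring2rank s)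

-- ===== LEMMAS AND PROOFS =====

-- A's loop body, rewritten over Nat indices into a fixed list l.
def pvStepA (l : List Char) (pr : Int × Int) (k : Nat) : Int × Int :=
  (pr.1 * 2, if l.getD k 'A' ≠ 'A' then pr.2 + pr.1 else pr.2)

-- B's Horner step.
def pvStepB (ran : Int) (c : Char) : Int := ran * 2 + (if c = 'A' then 0 else 1)

-- A's indices list after the pyRange bridge: (range n).reverse.
lemma pvA_eq_nat_fold (s : String) :
    ABstring2rank s =
      (((List.range s.toList.length).reverse).foldl (pvStepA s.toList) (1, 0)).2 := by
  unfold ABstring2rank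
  have hlen : PySem.Str.len s = (s.toList.length : Int) := by
    simp [PySem.Str.len_eq]
  rw [hlen]
  have h1 : PySem.List.pyRange ((s.toList.length : Int) - 1) (-1) (-1)
      = (PySem.List.pyRange 0 s.toList.length 1).reverse := by
    have := PySem.List.pyRange_neg_one_eq_reverse ((s.toList.length : Int) - 1) (-1)
    simpa using this
  rw [h1, PySem.List.pyRange_zero_nat, ← List.map_reverse, List.foldl_map]
  refine congrArg Prod.snd (PySem.List.foldl_congr_mem _ _ _ _ ?_)
  intro pr k _
  simp [pvStepA, PySem.List.pyGetD_natCast]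

-- Main invariant: folding A's step over the reversed indices of l computes
-- ran + pos * (B's Horner value of l).
lemma pvA_inv (l : List Char) : ∀ (pos ran : Int),
    (((List.range l.length).reverse).foldl (pvStepA l) (pos, ran)).2
      = ran + pos * l.foldl pvStepB 0 := by
  induction l using List.reverseRecOn with
  | nil => intro pos ran; simp
  | append_singleton t c ih =>
    intro pos ran
    have hrange : (List.range (t ++ [c]).length).reverse
        = t.length :: (List.range t.length).reverse := by
      simp [List.range_succ]
    rw [hrange]
    have hcongr : ((List.range t.length).reverse).foldl (pvStepA (t ++ [c]))
          (pvStepA (t ++ [c]) (pos, ran) t.length)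
        = ((List.range t.length).reverse).foldl (pvStepA t)
          (pvStepA (t ++ [c]) (pos, ran) t.length) := by
      apply PySem.List.foldl_congr_mem
      intro pr k hk
      have hk' : k < t.length := by
        have := List.mem_reverse.mp hk
        exact List.mem_range.mp this
      simp [pvStepA, List.getElem?_append_left hk']
    have hhead : pvStepA (t ++ [c]) (pos, ran) t.length
        = (pos * 2, if c ≠ 'A' then ran + pos else ran) := by
      simp [pvStepA]
    rw [List.foldl_cons, hcongr, hhead, ih]
    have hB : (t ++ [c]).foldl pvStepB 0 = (t.foldl pvStepB 0) * 2 + (if c = 'A' then 0 else 1) := by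
      simp [List.foldl_append, pvStepB]
    rw [hB]
    by_cases hc : c = 'A' <;> simp [hc] <;> ring

-- ===== VERDICT (by name: the statement is the Claim_ definition above) =====
theorem ABstring2rank_spec : Claim_equal_ABstring2rank := by
  intro s _
  unfold Spec_ABstring2rank ABstring2rank_alt
  rw [pvA_eq_nat_fold, pvA_inv]
  simp only [zero_add, one_mul]
  rfl
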